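-- pv_equiv track=rewrite | github.com/neynt/nptools | activities/shapeshifter_bad.py | add_shapes
-- ===== SOURCE A (Python) =====
-- def add_shapes(s1, s2, N):
--     res = 0
--     b = 1
--     while s1 or s2:
--         res += b * ((s1 % N + s2 % N) % N)
--         b *= N
--         s1 //= N
--         s2 //= N
--     return res
-- ===== SOURCE B (Python) =====
-- def add_shapes(s1, s2, N):
--     d1 = []
--     while s1:
--         d1.append(s1 % N)
--         s1 //= N
--     d2 = []
--     while s2:
--         d2.append(s2 % N)
--         s2 //= N
--     while len(d1) < len(d2):
--         d1.append(0)
--     while len(d2) < len(d1):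
--         d2.append(0)
--     res = 0
--     for a, c in zip(reversed(d1), reversed(d2)):
--         res = res * N + (a + c) % N
--     return res
-- ===== Notes on version B (the rewrite author's own statement) =====
-- stated objective: alternative
-- what changed: A's single interleaved loop (accumulating res and the weight b while dividing both numbers simultaneously) is replaced by an explicit three-phase decomposition: extract each number's base-N digit list in its own loop, pad the shorter list with zeros, then combine with one Horner pass over the reversed lists.
import Mathlib
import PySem

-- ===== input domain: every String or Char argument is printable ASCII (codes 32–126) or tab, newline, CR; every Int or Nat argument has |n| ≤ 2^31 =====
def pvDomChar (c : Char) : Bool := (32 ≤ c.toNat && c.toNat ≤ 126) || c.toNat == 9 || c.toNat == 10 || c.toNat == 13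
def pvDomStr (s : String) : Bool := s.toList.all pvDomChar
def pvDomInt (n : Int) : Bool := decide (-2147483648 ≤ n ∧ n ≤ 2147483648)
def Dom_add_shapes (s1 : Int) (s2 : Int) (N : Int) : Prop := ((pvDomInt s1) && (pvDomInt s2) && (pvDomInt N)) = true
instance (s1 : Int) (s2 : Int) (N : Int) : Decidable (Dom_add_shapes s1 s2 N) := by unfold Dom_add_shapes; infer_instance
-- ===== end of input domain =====

-- B replaces A's single interleaved carry-free loop by an explicit extract-digits /
-- pad / combine decomposition (objective: alternative decomposition, same cost).

-- fuel bound for the `while` loops (a totality guard only: on Pre_ the measure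
-- strictly decreases each iteration, so this fuel is never exhausted there)
def pvMeas (s N : Int) : Nat := 2 * s.natAbs + (if 0 < s ∧ N < 0 then 1 else 0)

-- ===== PORT A =====
-- `while s1 or s2: res += b*((s1%N + s2%N)%N); b *= N; s1 //= N; s2 //= N`
def addShapesLoop : Nat → Int → Int → Int → Int → Int → Int
  | 0, _, _, _, res, _ => res
  | fuel + 1, s1, s2, N, res, b =>
      if s1 ≠ 0 ∨ s2 ≠ 0 then
        addShapesLoop fuel (PySem.Int.floordiv s1 N) (PySem.Int.floordiv s2 N) N
          (res + b * (PySem.Int.mod (PySem.Int.mod s1 N + PySem.Int.mod s2 N) N)) (b * N)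
      else res

def add_shapes (s1 : Int) (s2 : Int) (N : Int) : Int :=
  addShapesLoop (pvMeas s1 N + pvMeas s2 N + 1) s1 s2 N 0 1

-- ===== PORT B =====
-- `d = []` ; `while s: d.append(s % N); s //= N`  (same fuel device as in port A)
def digitsLoop : Nat → Int → Int → List Int → List Int
  | 0, _, _, acc => acc
  | fuel + 1, s, N, acc =>
      if s ≠ 0 then digitsLoop fuel (PySem.Int.floordiv s N) N (acc ++ [PySem.Int.mod s N])
      else acc

def pvDigits (s N : Int) : List Int := digitsLoop (pvMeas s N + 1) s N []

-- `while len(l) < t: l.append(0)`  (t is the other list's length, unchanged by the loop)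
def padLoop : Nat → List Int → Nat → List Int
  | 0, l, _ => l
  | fuel + 1, l, t => if l.length < t then padLoop fuel (l ++ [0]) t else l

def add_shapes_alt (s1 : Int) (s2 : Int) (N : Int) : Int :=
  let d1 := pvDigits s1 N
  let d2 := pvDigits s2 N
  let p1 := padLoop (d2.length - d1.length) d1 d2.length
  let p2 := padLoop (p1.length - d2.length) d2 p1.length
  (p1.reverse.zip p2.reverse).foldl
    (fun res ac => res * N + PySem.Int.mod (ac.1 + ac.2) N) 0

-- ===== PRECONDITION & SPEC =====
-- Pre_ is exactly where the Python A terminates: both inputs zero, or nonnegative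
-- inputs with base N ≥ 2, or any inputs with N ≤ -2; everywhere else A loops
-- forever (or divides by zero at N = 0), so nothing is claimed there.
def Pre_add_shapes (s1 : Int) (s2 : Int) (N : Int) : Prop :=
  (s1 = 0 ∧ s2 = 0) ∨ (0 ≤ s1 ∧ 0 ≤ s2 ∧ 2 ≤ N) ∨ N ≤ -2
instance (s1 : Int) (s2 : Int) (N : Int) : Decidable (Pre_add_shapes s1 s2 N) := by
  unfold Pre_add_shapes; infer_instance

def pvWitness_add_shapes : Int × Int × Int := (5, 7, 3)

def Spec_add_shapes (s1 : Int) (s2 : Int) (N : Int) (out : Int) : Prop := out = add_shapes_alt s1 s2 N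
instance (s1 : Int) (s2 : Int) (N : Int) (out : Int) : Decidable (Spec_add_shapes s1 s2 N out) := by unfold Spec_add_shapes; infer_instance

-- ===== CLAIM (what is proved, stated in full; the proofs are below) =====
def Claim_equal_add_shapes : Prop := ∀ (s1 : Int) (s2 : Int) (N : Int), Dom_add_shapes s1 s2 N → Pre_add_shapes s1 s2 N → Spec_add_shapes s1 s2 N (add_shapes s1 s2 N)

-- ===== LEMMAS AND PROOFS =====

-- arithmetic facts about one division step
theorem pv_floordiv_zero (N : Int) : PySem.Int.floordiv 0 N = 0 := by
  simp [PySem.Int.floordiv]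

theorem pv_mod_zero (N : Int) : PySem.Int.mod 0 N = 0 := by
  simp [PySem.Int.mod]

theorem pvMeas_zero (N : Int) : pvMeas 0 N = 0 := by simp [pvMeas]

theorem pvMeas_lt (s N : Int) (hs : s ≠ 0) (hc : (0 ≤ s ∧ 2 ≤ N) ∨ N ≤ -2) :
    pvMeas (PySem.Int.floordiv s N) N < pvMeas s N := by
  have hqr := PySem.Int.floordiv_mul_add_mod s N
  set q := PySem.Int.floordiv s N with hq
  set r := PySem.Int.mod s N with hr
  rcases hc with ⟨h0, h2⟩ | hneg
  · -- 0 < N case: 0 ≤ r < N, show 0 ≤ q < s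
    have hrb1 : 0 ≤ r := PySem.Int.mod_nonneg s (by omega)
    have hrb2 : r < N := PySem.Int.mod_lt s (by omega)
    have hs' : 0 < s := lt_of_le_of_ne h0 (Ne.symm hs)
    have hq0 : 0 ≤ q := by nlinarith
    have hqs : q < s := by nlinarith
    simp only [pvMeas]
    split <;> split <;> omega
  · -- N ≤ -2 case: N < r ≤ 0
    have hrb := PySem.Int.mod_neg_bounds s (show N < 0 by omega)
    rcases lt_or_gt_of_ne hs with hsneg | hspos
    · -- s < 0 : q ≥ 0 and q < -s
      have hq0 : 0 ≤ q := by nlinarith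
      have hqs : q < -s := by nlinarith
      simp only [pvMeas]
      split <;> split <;> omega
    · -- s > 0 : q < 0 and -q ≤ s
      have hq0 : q < 0 := by nlinarith
      have hqs : -q ≤ s := by nlinarith
      simp only [pvMeas]
      split <;> split <;> omega

theorem pv_floordiv_nonneg (s N : Int) (h0 : 0 ≤ s) (h2 : 2 ≤ N) :
    0 ≤ PySem.Int.floordiv s N := by
  have hqr := PySem.Int.floordiv_mul_add_mod s N
  have hrb1 := PySem.Int.mod_nonneg s (show (0:Int) < N by omega)
  have hrb2 := PySem.Int.mod_lt s (show (0:Int) < N by omega)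
  nlinarith

-- pair condition kept invariant by one division step
theorem pvCond_step (s1 s2 N : Int) (hC : (0 ≤ s1 ∧ 0 ≤ s2 ∧ 2 ≤ N) ∨ N ≤ -2) :
    (0 ≤ PySem.Int.floordiv s1 N ∧ 0 ≤ PySem.Int.floordiv s2 N ∧ 2 ≤ N) ∨ N ≤ -2 := by
  rcases hC with ⟨ha, hb, hn⟩ | hn
  · exact Or.inl ⟨pv_floordiv_nonneg s1 N ha hn, pv_floordiv_nonneg s2 N hb hn, hn⟩
  · exact Or.inr hn

theorem pvMeas_pair_lt (s1 s2 N : Int) (hnz : s1 ≠ 0 ∨ s2 ≠ 0)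
    (hC : (0 ≤ s1 ∧ 0 ≤ s2 ∧ 2 ≤ N) ∨ N ≤ -2) :
    pvMeas (PySem.Int.floordiv s1 N) N + pvMeas (PySem.Int.floordiv s2 N) N
      < pvMeas s1 N + pvMeas s2 N := by
  have hc1 : (0 ≤ s1 ∧ 2 ≤ N) ∨ N ≤ -2 := by tauto
  have hc2 : (0 ≤ s2 ∧ 2 ≤ N) ∨ N ≤ -2 := by tauto
  rcases hnz with h1 | h2
  · have := pvMeas_lt s1 N h1 hc1
    by_cases hz : s2 = 0
    · subst hz; simp only [pv_floordiv_zero, pvMeas_zero]; omega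
    · have := pvMeas_lt s2 N hz hc2; omega
  · have := pvMeas_lt s2 N h2 hc2
    by_cases hz : s1 = 0
    · subst hz; simp only [pv_floordiv_zero, pvMeas_zero]; omega
    · have := pvMeas_lt s1 N hz hc1; omega

-- reference value: digit-wise (s1%N + s2%N)%N, little-endian, with fuel
def pvSpecF : Nat → Int → Int → Int → Int
  | 0, _, _, _ => 0
  | fuel + 1, s1, s2, N =>
      if s1 ≠ 0 ∨ s2 ≠ 0 then
        PySem.Int.mod (PySem.Int.mod s1 N + PySem.Int.mod s2 N) N
          + N * pvSpecF fuel (PySem.Int.floordiv s1 N) (PySem.Int.floordiv s2 N) N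
      else 0

def pvSpec (s1 s2 N : Int) : Int := pvSpecF (pvMeas s1 N + pvMeas s2 N + 1) s1 s2 N

-- A's loop computes res + b · pvSpecF (same fuel), unconditionally
theorem addShapesLoop_eq (fuel : Nat) : ∀ (s1 s2 N res b : Int),
    addShapesLoop fuel s1 s2 N res b = res + b * pvSpecF fuel s1 s2 N := by
  induction fuel with
  | zero => intro s1 s2 N res b; simp [addShapesLoop, pvSpecF]
  | succ fuel ih =>
      intro s1 s2 N res b
      simp only [addShapesLoop, pvSpecF]
      by_cases h : s1 ≠ 0 ∨ s2 ≠ 0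
      · rw [if_pos h, if_pos h, ih]; ring
      · rw [if_neg h, if_neg h]; ring

theorem add_shapes_eq_pvSpec (s1 s2 N : Int) : add_shapes s1 s2 N = pvSpec s1 s2 N := by
  unfold add_shapes pvSpec; rw [addShapesLoop_eq]; ring

-- enough fuel: pvSpecF does not depend on the exact fuel
theorem pvSpecF_fuel (fuel : Nat) : ∀ (g : Nat) (s1 s2 N : Int),
    ((0 ≤ s1 ∧ 0 ≤ s2 ∧ 2 ≤ N) ∨ N ≤ -2) →
    pvMeas s1 N + pvMeas s2 N < fuel → pvMeas s1 N + pvMeas s2 N < g →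
    pvSpecF fuel s1 s2 N = pvSpecF g s1 s2 N := by
  induction fuel with
  | zero => intro g s1 s2 N _ h _; omega
  | succ fuel ih =>
      intro g s1 s2 N hC hf hg
      cases g with
      | zero => omega
      | succ g =>
          simp only [pvSpecF]
          by_cases h : s1 ≠ 0 ∨ s2 ≠ 0
          · rw [if_pos h, if_pos h,
                ih g (PySem.Int.floordiv s1 N) (PySem.Int.floordiv s2 N) N
                  (pvCond_step s1 s2 N hC)
                  (by have := pvMeas_pair_lt s1 s2 N h hC; omega)
                  (by have := pvMeas_pair_lt s1 s2 N h hC; omega)]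
          · rw [if_neg h, if_neg h]

theorem pvSpec_cons (s1 s2 N : Int) (hnz : s1 ≠ 0 ∨ s2 ≠ 0)
    (hC : (0 ≤ s1 ∧ 0 ≤ s2 ∧ 2 ≤ N) ∨ N ≤ -2) :
    pvSpec s1 s2 N = PySem.Int.mod (PySem.Int.mod s1 N + PySem.Int.mod s2 N) N
      + N * pvSpec (PySem.Int.floordiv s1 N) (PySem.Int.floordiv s2 N) N := by
  unfold pvSpec
  conv_lhs => rw [pvSpecF]
  rw [if_pos hnz]
  congr 1
  congr 1
  exact pvSpecF_fuel _ _ _ _ _ (pvCond_step s1 s2 N hC)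
    (by have := pvMeas_pair_lt s1 s2 N hnz hC; omega)
    (by omega)

theorem pvSpec_zero (N : Int) : pvSpec 0 0 N = 0 := by
  simp [pvSpec, pvSpecF]

-- digit extraction: the accumulator is append-only
theorem digitsLoop_acc (fuel : Nat) : ∀ (s N : Int) (acc : List Int),
    digitsLoop fuel s N acc = acc ++ digitsLoop fuel s N [] := by
  induction fuel with
  | zero => intro s N acc; simp [digitsLoop]
  | succ fuel ih =>
      intro s N acc
      simp only [digitsLoop]
      by_cases h : s ≠ 0
      · rw [if_pos h, if_pos h, ih _ _ (acc ++ [PySem.Int.mod s N]),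
            ih (PySem.Int.floordiv s N) N ([] ++ [PySem.Int.mod s N])]
        simp
      · rw [if_neg h, if_neg h]
        simp

-- enough fuel: the digit list does not depend on the exact fuel
theorem digitsLoop_fuel (fuel : Nat) : ∀ (g : Nat) (s N : Int),
    ((0 ≤ s ∧ 2 ≤ N) ∨ N ≤ -2) → pvMeas s N < fuel → pvMeas s N < g →
    digitsLoop fuel s N [] = digitsLoop g s N [] := by
  induction fuel with
  | zero => intro g s N _ h _; omega
  | succ fuel ih =>
      intro g s N hc hf hg
      cases g with
      | zero => omega
      | succ g =>
          simp only [digitsLoop]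
          by_cases h : s ≠ 0
          · have hlt := pvMeas_lt s N h hc
            have hc' : (0 ≤ PySem.Int.floordiv s N ∧ 2 ≤ N) ∨ N ≤ -2 := by
              rcases hc with ⟨h0, h2⟩ | hn
              · exact Or.inl ⟨pv_floordiv_nonneg s N h0 h2, h2⟩
              · exact Or.inr hn
            rw [if_pos h, if_pos h, digitsLoop_acc fuel, digitsLoop_acc g,
                ih g (PySem.Int.floordiv s N) N hc' (by omega) (by omega)]
          · rw [if_neg h, if_neg h]

theorem pvDigits_cons (s N : Int) (hs : s ≠ 0) (hc : (0 ≤ s ∧ 2 ≤ N) ∨ N ≤ -2) :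
    pvDigits s N = PySem.Int.mod s N :: pvDigits (PySem.Int.floordiv s N) N := by
  have hlt := pvMeas_lt s N hs hc
  have hc' : (0 ≤ PySem.Int.floordiv s N ∧ 2 ≤ N) ∨ N ≤ -2 := by
    rcases hc with ⟨h0, h2⟩ | hn
    · exact Or.inl ⟨pv_floordiv_nonneg s N h0 h2, h2⟩
    · exact Or.inr hn
  unfold pvDigits
  conv_lhs => rw [digitsLoop]
  rw [if_pos hs, digitsLoop_acc,
      digitsLoop_fuel (pvMeas s N) (pvMeas (PySem.Int.floordiv s N) N + 1)
        (PySem.Int.floordiv s N) N hc' (by omega) (by omega)]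
  simp

theorem pvDigits_zero (N : Int) : pvDigits 0 N = [] := by
  simp [pvDigits, digitsLoop]

-- padding appends zeros up to the target length
theorem padLoop_eq (fuel : Nat) : ∀ (l : List Int) (t : Nat), t - l.length ≤ fuel →
    padLoop fuel l t = l ++ List.replicate (t - l.length) 0 := by
  induction fuel with
  | zero =>
      intro l t h
      have h0 : t - l.length = 0 := by omega
      simp [padLoop, h0]
  | succ fuel ih =>
      intro l t h
      rw [padLoop]
      by_cases hlt : l.length < t
      · rw [if_pos hlt, ih (l ++ [0]) t (by simp; omega)]
        have ht : t - l.length = (t - (l ++ [0]).length) + 1 := by simp; omega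
        rw [ht, List.replicate_succ]
        simp
      · rw [if_neg hlt]
        have h0 : t - l.length = 0 := by omega
        simp [h0]

-- the combine pass, little-endian
def pvV (N : Int) : List Int → List Int → Int
  | a :: as, c :: cs => PySem.Int.mod (a + c) N + N * pvV N as cs
  | _, _ => 0

theorem foldr_eq_pvV (N : Int) : ∀ (l1 l2 : List Int), l1.length = l2.length →
    List.foldr (fun p r => r * N + PySem.Int.mod (p.1 + p.2) N) 0 (l1.zip l2) = pvV N l1 l2 := by
  intro l1
  induction l1 with
  | nil => intro l2 h; cases l2 <;> simp_all [pvV]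
  | cons a as ih =>
      intro l2 h
      cases l2 with
      | nil => simp at h
      | cons c cs =>
          simp only [List.zip_cons_cons, List.foldr_cons, pvV]
          rw [ih cs (by simpa using h)]
          ring

theorem revzip_foldl (N : Int) (l1 l2 : List Int) (h : l1.length = l2.length) :
    (l1.reverse.zip l2.reverse).foldl
      (fun res ac => res * N + PySem.Int.mod (ac.1 + ac.2) N) 0 = pvV N l1 l2 := by
  have hz : l1.reverse.zip l2.reverse = (l1.zip l2).reverse := by
    induction l1 generalizing l2 with
    | nil => cases l2 <;> simp_all
    | cons a as ih =>
        cases l2 with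
        | nil => simp at h
        | cons c cs =>
            simp only [List.reverse_cons, List.zip_cons_cons]
            rw [List.zip_append (by simpa using h), ih cs (by simpa using h)]
            simp
  rw [hz, List.foldl_reverse, foldr_eq_pvV N l1 l2 h]

-- core: the padded digit lists, combined little-endian, compute pvSpec
theorem pvV_pad_eq (N : Int) : ∀ (L : Nat) (s1 s2 : Int),
    ((0 ≤ s1 ∧ 0 ≤ s2 ∧ 2 ≤ N) ∨ N ≤ -2) →
    (pvDigits s1 N).length ≤ L → (pvDigits s2 N).length ≤ L →
    pvV N (pvDigits s1 N ++ List.replicate (L - (pvDigits s1 N).length) 0)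
          (pvDigits s2 N ++ List.replicate (L - (pvDigits s2 N).length) 0)
      = pvSpec s1 s2 N := by
  intro L
  induction L with
  | zero =>
      intro s1 s2 hC h1 h2
      have hc1 : (0 ≤ s1 ∧ 2 ≤ N) ∨ N ≤ -2 := by tauto
      have hc2 : (0 ≤ s2 ∧ 2 ≤ N) ∨ N ≤ -2 := by tauto
      have hz1 : s1 = 0 := by
        by_contra hne
        rw [pvDigits_cons s1 N hne hc1] at h1; simp at h1
      have hz2 : s2 = 0 := by
        by_contra hne
        rw [pvDigits_cons s2 N hne hc2] at h2; simp at h2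
      subst hz1; subst hz2
      rw [pvSpec_zero]
      simp [pvDigits_zero, pvV]
  | succ L ih =>
      intro s1 s2 hC h1 h2
      have hc1 : (0 ≤ s1 ∧ 2 ≤ N) ∨ N ≤ -2 := by tauto
      have hc2 : (0 ≤ s2 ∧ 2 ≤ N) ∨ N ≤ -2 := by tauto
      -- each padded list is head digit :: padded tail digits
      have step : ∀ s : Int, ((0 ≤ s ∧ 2 ≤ N) ∨ N ≤ -2) → (pvDigits s N).length ≤ L + 1 →
          (pvDigits s N ++ List.replicate (L + 1 - (pvDigits s N).length) 0)
            = PySem.Int.mod s N ::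
              (pvDigits (PySem.Int.floordiv s N) N
                ++ List.replicate (L - (pvDigits (PySem.Int.floordiv s N) N).length) 0) ∧
          (pvDigits (PySem.Int.floordiv s N) N).length ≤ L := by
        intro s hc hlen
        by_cases hz : s = 0
        · subst hz
          rw [pv_floordiv_zero, pv_mod_zero, pvDigits_zero]
          simp [List.replicate_succ]
        · rw [pvDigits_cons s N hz hc] at hlen ⊢
          simp only [List.length_cons] at hlen ⊢
          have hle : (pvDigits (PySem.Int.floordiv s N) N).length ≤ L := by omega
          refine ⟨?_, hle⟩
          have harith : L + 1 - ((pvDigits (PySem.Int.floordiv s N) N).length + 1)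
              = L - (pvDigits (PySem.Int.floordiv s N) N).length := by omega
          rw [harith]
          simp
      obtain ⟨e1, hl1⟩ := step s1 hc1 h1
      obtain ⟨e2, hl2⟩ := step s2 hc2 h2
      rw [e1, e2]
      simp only [pvV]
      rw [ih (PySem.Int.floordiv s1 N) (PySem.Int.floordiv s2 N) (pvCond_step s1 s2 N hC) hl1 hl2]
      by_cases hz : s1 = 0 ∧ s2 = 0
      · obtain ⟨hz1, hz2⟩ := hz
        subst hz1; subst hz2
        rw [pvSpec_zero, pv_mod_zero, pv_floordiv_zero, pvSpec_zero]
        simp [pv_mod_zero]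
      · rw [pvSpec_cons s1 s2 N (by tauto) hC]

theorem add_shapes_alt_eq_pvSpec (s1 s2 N : Int) (hP : Pre_add_shapes s1 s2 N) :
    add_shapes_alt s1 s2 N = pvSpec s1 s2 N := by
  unfold Pre_add_shapes at hP
  rcases hP with ⟨hz1, hz2⟩ | hC
  · -- both zero: digit lists are empty whatever N is
    subst hz1; subst hz2
    have he : add_shapes_alt 0 0 N
        = ((padLoop ((pvDigits 0 N).length - (pvDigits 0 N).length) (pvDigits 0 N)
              (pvDigits 0 N).length).reverse.zip
            (padLoop ((padLoop ((pvDigits 0 N).length - (pvDigits 0 N).length) (pvDigits 0 N)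
                (pvDigits 0 N).length).length - (pvDigits 0 N).length) (pvDigits 0 N)
              (padLoop ((pvDigits 0 N).length - (pvDigits 0 N).length) (pvDigits 0 N)
                (pvDigits 0 N).length).length).reverse).foldl
            (fun res ac => res * N + PySem.Int.mod (ac.1 + ac.2) N) 0 := rfl
    rw [he, pvDigits_zero, pvSpec_zero]
    simp [padLoop]
  · have hC : (0 ≤ s1 ∧ 0 ≤ s2 ∧ 2 ≤ N) ∨ N ≤ -2 := by tauto
    set d1 := pvDigits s1 N with hd1
    set d2 := pvDigits s2 N with hd2
    set L := max d1.length d2.length with hL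
    have hp1 : padLoop (d2.length - d1.length) d1 d2.length
        = d1 ++ List.replicate (L - d1.length) 0 := by
      rw [padLoop_eq (d2.length - d1.length) d1 d2.length le_rfl]
      congr 2
      omega
    have hlen1 : (padLoop (d2.length - d1.length) d1 d2.length).length = L := by
      rw [hp1]; simp; omega
    have hp2 : padLoop ((padLoop (d2.length - d1.length) d1 d2.length).length - d2.length) d2
          (padLoop (d2.length - d1.length) d1 d2.length).length
        = d2 ++ List.replicate (L - d2.length) 0 := by
      rw [padLoop_eq _ _ _ le_rfl]
      rw [hlen1]
    have hlen2 : (padLoop ((padLoop (d2.length - d1.length) d1 d2.length).length - d2.length) d2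
          (padLoop (d2.length - d1.length) d1 d2.length).length).length = L := by
      rw [hp2]; simp; omega
    have he : add_shapes_alt s1 s2 N
        = ((padLoop (d2.length - d1.length) d1 d2.length).reverse.zip
            (padLoop ((padLoop (d2.length - d1.length) d1 d2.length).length - d2.length) d2
              (padLoop (d2.length - d1.length) d1 d2.length).length).reverse).foldl
            (fun res ac => res * N + PySem.Int.mod (ac.1 + ac.2) N) 0 := rfl
    rw [he, revzip_foldl N _ _ (hlen1.trans hlen2.symm), hp2, hp1]
    exact pvV_pad_eq N L s1 s2 hC (by rw [← hd1]; omega) (by rw [← hd2]; omega)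

-- ===== VERDICT (by name: the statement is the Claim_ definition above) =====
theorem add_shapes_spec : Claim_equal_add_shapes := by
  intro s1 s2 N _hD hP
  unfold Spec_add_shapes
  rw [add_shapes_eq_pvSpec, add_shapes_alt_eq_pvSpec s1 s2 N hP]
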